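-- pv_equiv track=rewrite | github.com/LittleFish-Coder/basketball-sports-ai | code_from_muran/pdz_tool/predictptz.py | find_continuous_blocks_with_ranges
-- ===== SOURCE A (Python) =====
-- def find_continuous_blocks_with_ranges(array):
--     count = 0
--     is_block = False
--     blocks = []
--     start = -1
--     for i, element in enumerate(array):
--         if element != 0 and not is_block:
--             is_block = True
--             count += 1
--             start = i
--         elif element == 0 and is_block:
--             is_block = False
--             blocks.append((start, i-1))
--     if is_block:  # 處理最後一個連續區塊
--         blocks.append((start, len(array)-1))
--     return count, blocks
-- ===== SOURCE B (Python) =====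
-- def find_continuous_blocks_with_ranges(array):
--     blocks = []
--     i, n = 0, len(array)
--     while i < n:
--         if array[i] != 0:
--             j = i
--             while j < n and array[j] != 0:
--                 j += 1
--             blocks.append((i, j - 1))
--             i = j
--         else:
--             i += 1
--     return len(blocks), blocks
-- ===== Notes on version B (the rewrite author's own statement) =====
-- stated objective: alternative
-- what changed: Replaced the stateful is_block edge-detection loop (with trailing-block patch-up) by a two-pointer run scan that consumes each maximal nonzero run in an inner scan and derives the count as len(blocks).
import Mathlib
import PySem

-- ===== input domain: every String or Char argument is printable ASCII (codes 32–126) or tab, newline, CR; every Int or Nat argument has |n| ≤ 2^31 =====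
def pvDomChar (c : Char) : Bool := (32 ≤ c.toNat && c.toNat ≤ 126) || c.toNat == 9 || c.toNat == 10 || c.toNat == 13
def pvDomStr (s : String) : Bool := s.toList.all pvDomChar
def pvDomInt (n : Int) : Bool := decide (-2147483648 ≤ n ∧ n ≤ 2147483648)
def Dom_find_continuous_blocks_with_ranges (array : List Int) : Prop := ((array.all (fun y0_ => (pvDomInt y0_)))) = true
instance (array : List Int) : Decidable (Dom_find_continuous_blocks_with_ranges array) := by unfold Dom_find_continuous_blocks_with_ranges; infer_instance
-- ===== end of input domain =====

-- B replaces A's stateful edge-detection flag by a two-pointer maximal-run scan (alternative decomposition, same cost).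

-- ===== PORT A =====
-- the for-loop over enumerate(array), state (count, is_block, blocks, start), index carried explicitly
def aLoop : List Int → Int → (Int × Bool × List (Int × Int) × Int) → (Int × Bool × List (Int × Int) × Int)
  | [], _, st => st
  | x :: xs, i, (count, is_block, blocks, start) =>
    if x ≠ 0 ∧ is_block = false then aLoop xs (i+1) (count+1, true, blocks, i)
    else if x = 0 ∧ is_block = true then aLoop xs (i+1) (count, false, blocks ++ [(start, i-1)], start)
    else aLoop xs (i+1) (count, is_block, blocks, start)

def find_continuous_blocks_with_ranges (array : List Int) : Int × (List (Int × Int)) :=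
  let st := aLoop array 0 (0, false, [], -1)
  let (count, is_block, blocks, start) := st
  if is_block then (count, blocks ++ [(start, (array.length : Int) - 1)]) else (count, blocks)

-- ===== PORT B =====
-- inner while loop: consume the maximal nonzero run, return (its length, the rest)
def takeRun : List Int → Nat × List Int
  | [] => (0, [])
  | x :: xs => if x ≠ 0 then ((takeRun xs).1 + 1, (takeRun xs).2) else (0, x :: xs)

theorem takeRun_len_le : ∀ (l : List Int), (takeRun l).2.length ≤ l.length
  | [] => le_refl _
  | x :: xs => by
    simp only [takeRun]
    split
    · exact le_trans (takeRun_len_le xs) (Nat.le_succ _)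
    · simp

-- outer while loop: i is the absolute index of the head of the remaining list
def scanB : List Int → Int → List (Int × Int)
  | [], _ => []
  | x :: xs, i =>
    if x ≠ 0 then
      (i, i + (takeRun xs).1) :: scanB (takeRun xs).2 (i + 1 + (takeRun xs).1)
    else scanB xs (i + 1)
  termination_by l _ => l.length
  decreasing_by
    · exact Nat.lt_succ_of_le (takeRun_len_le xs)
    · exact Nat.lt_succ_of_le (le_refl _)

def find_continuous_blocks_with_ranges_alt (array : List Int) : Int × (List (Int × Int)) :=
  let blocks := scanB array 0
  ((blocks.length : Int), blocks)

-- ===== PRECONDITION & SPEC =====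
def Spec_find_continuous_blocks_with_ranges (array : List Int) (out : Int × (List (Int × Int))) : Prop := out = find_continuous_blocks_with_ranges_alt array
instance (array : List Int) (out : Int × (List (Int × Int))) : Decidable (Spec_find_continuous_blocks_with_ranges array out) := by unfold Spec_find_continuous_blocks_with_ranges; infer_instance

-- ===== CLAIM (what is proved, stated in full; the proofs are below) =====
def Claim_equal_find_continuous_blocks_with_ranges : Prop := ∀ (array : List Int), Dom_find_continuous_blocks_with_ranges array → Spec_find_continuous_blocks_with_ranges array (find_continuous_blocks_with_ranges array)

-- ===== LEMMAS AND PROOFS =====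

-- apply A's trailing-block handling to a loop state, n = total length as Int
def finishA (st : Int × Bool × List (Int × Int) × Int) (n : Int) : Int × (List (Int × Int)) :=
  let (count, is_block, blocks, start) := st
  if is_block then (count, blocks ++ [(start, n - 1)]) else (count, blocks)

theorem aLoop_scanB : ∀ (l : List Int) (i c : Int) (bl : List (Int × Int)) (s : Int),
    (finishA (aLoop l i (c, false, bl, s)) (i + l.length)
      = (c + (scanB l i).length, bl ++ scanB l i))
    ∧ (finishA (aLoop l i (c, true, bl, s)) (i + l.length)
      = (c + (scanB (takeRun l).2 (i + (takeRun l).1)).length,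
         bl ++ (s, i + (takeRun l).1 - 1) :: scanB (takeRun l).2 (i + (takeRun l).1)))
  | [], i, c, bl, s => by
    constructor
    · simp [aLoop, finishA, scanB]
    · simp [aLoop, finishA, takeRun, scanB]
  | x :: xs, i, c, bl, s => by
    by_cases hx : x = 0
    · subst hx
      refine ⟨?_, ?_⟩
      · have ih := (aLoop_scanB xs (i+1) c bl s).1
        simp only [aLoop, scanB]
        simp
        rw [show i + ((xs.length : Int) + 1) = i + 1 + xs.length by ring]
        exact ih
      · have ih := (aLoop_scanB xs (i+1) c (bl ++ [(s, i - 1)]) s).1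
        simp only [aLoop, takeRun]
        simp
        rw [show i + ((xs.length : Int) + 1) = i + 1 + xs.length by ring, ih]
        simp [scanB]
    · refine ⟨?_, ?_⟩
      · have ih := (aLoop_scanB xs (i+1) (c+1) bl i).2
        simp only [aLoop, scanB]
        simp [hx]
        rw [show i + ((xs.length : Int) + 1) = i + 1 + xs.length by ring, ih,
          show i + 1 + ((takeRun xs).1 : Int) - 1 = i + ((takeRun xs).1 : Int) by ring]
        congr 1
        ring
      · have ih := (aLoop_scanB xs (i+1) c bl s).2
        simp only [aLoop, takeRun]
        simp [hx]
        rw [show i + (((takeRun xs).1 : Int) + 1) = i + 1 + (takeRun xs).1 by ring,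
          show i + ((xs.length : Int) + 1) = i + 1 + xs.length by ring]
        exact ih

-- ===== VERDICT (by name: the statement is the Claim_ definition above) =====
theorem find_continuous_blocks_with_ranges_spec : Claim_equal_find_continuous_blocks_with_ranges := by
  intro array _
  unfold Spec_find_continuous_blocks_with_ranges find_continuous_blocks_with_ranges find_continuous_blocks_with_ranges_alt
  have h := (aLoop_scanB array 0 0 [] (-1)).1
  simp only [zero_add] at h
  have : finishA (aLoop array 0 (0, false, [], -1)) (array.length : Int)
      = (((scanB array 0).length : Int), scanB array 0) := by simpa using h
  simpa [finishA] using this
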